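-- pv_equiv track=rewrite | github.com/RKelln/covenant | build/sections.py | extract_body_parts
-- ===== SOURCE A (Python) =====
-- SECTION_HEADINGS = ["# Ritual", "# Spec", "# Digest", "# Log"]
--
-- def extract_body_parts(body: str) -> dict:
--     """Split a section body into its register parts (Ritual, Spec, Digest, Log)."""
--     positions = []
--     for h in SECTION_HEADINGS:
--         pos = body.find(h)
--         if pos != -1:
--             positions.append((pos, h))
--     positions.sort()
--
--     parts = {}
--     for i, (pos, h) in enumerate(positions):
--         start = pos + len(h)
--         end = positions[i + 1][0] if i + 1 < len(positions) else len(body)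
--         parts[h.replace("# ", "")] = body[start:end].strip()
--     return parts
-- ===== SOURCE B (Python) =====
-- SECTION_HEADINGS = ["# Ritual", "# Spec", "# Digest", "# Log"]
--
-- def extract_body_parts(body: str) -> dict:
--     """Split a section body into its register parts (Ritual, Spec, Digest, Log)."""
--     # One left-to-right scan: record the first occurrence of each heading in
--     # appearance order, then slice between consecutive recorded headings.
--     found = []              # (pos, heading) in increasing position order
--     seen = set()
--     for i in range(len(body)):
--         for h in SECTION_HEADINGS:
--             if h not in seen and body.startswith(h, i):
--                 found.append((i, h))
--                 seen.add(h)
--                 break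
--     bounds = [p for p, _ in found[1:]] + [len(body)]
--     return {h.replace("# ", ""): body[pos + len(h):end].strip()
--             for (pos, h), end in zip(found, bounds)}
-- ===== Notes on version B (the rewrite author's own statement) =====
-- stated objective: alternative
-- what changed: A calls body.find once per heading, sorts the (pos, heading) tuples and slices with an indexed lookahead loop; B makes a single left-to-right scan over the body recording the first occurrence of each heading in position order (so no sort is needed) and zips each hit with the next hit's start to slice the parts.
import Mathlib
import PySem

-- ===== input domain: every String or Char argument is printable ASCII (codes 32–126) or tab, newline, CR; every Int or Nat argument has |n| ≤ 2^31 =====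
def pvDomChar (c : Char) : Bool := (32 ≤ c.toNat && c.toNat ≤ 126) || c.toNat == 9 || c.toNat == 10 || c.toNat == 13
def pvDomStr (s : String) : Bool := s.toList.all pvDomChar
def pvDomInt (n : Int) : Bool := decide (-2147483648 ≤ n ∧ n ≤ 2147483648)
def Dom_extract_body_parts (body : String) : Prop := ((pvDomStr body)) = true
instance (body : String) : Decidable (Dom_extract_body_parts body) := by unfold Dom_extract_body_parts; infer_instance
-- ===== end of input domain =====

-- B replaces A's four body.find calls + tuple sort + indexed-lookahead loop by one left-to-right
-- scan recording first heading occurrences in position order, zipped with next-start bounds (objective: alternative).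

-- ===== PORT A =====
def SECTION_HEADINGS : List String := ["# Ritual", "# Spec", "# Digest", "# Log"]

-- 'positions = []; for h in SECTION_HEADINGS: pos = body.find(h); if pos != -1: positions.append((pos, h))'
def posList (body : String) : List (Int × String) :=
  SECTION_HEADINGS.foldl (fun acc h =>
    let pos := PySem.Str.find body h
    if pos ≠ -1 then acc ++ [(pos, h)] else acc) []

-- 'for i, (pos, h) in enumerate(positions): …' — positions[i+1][0] read as the head of the rest
def partsLoopA (body : String) : List (Int × String) → PySem.Dict String String → PySem.Dict String String
  | [], d => d
  | (pos, h) :: rest, d =>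
    let start := pos + PySem.Str.len h
    let e : Int := match rest with
      | (p2, _) :: _ => p2
      | [] => PySem.Str.len body
    partsLoopA body rest
      (d.insert (PySem.Str.replace h "# " "")
        (PySem.Str.strip (PySem.Str.slice body (some start) (some e))))

-- positions.sort() on (int, str) tuples is the lexicographic tuple sort = sorted2 by (fst, snd)
def extract_body_parts (body : String) : List (String × String) :=
  (partsLoopA body (PySem.List.sorted2 (posList body) (·.1) (·.2)) PySem.Dict.empty).items

-- ===== PORT B =====
-- inner 'for h in SECTION_HEADINGS: if h not in seen and body.startswith(h, i): …; break'
def firstHit (seen : PySem.Set String) (tail : List Char) : List String → Option String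
  | [] => none
  | h :: hs =>
    if seen.contains h = false ∧ PySem.Chars.startswith tail h.toList = true then some h
    else firstHit seen tail hs

-- 'for i in range(len(body)):' collecting (i, h) and marking h seen;
-- body.startswith(h, i) ported as Chars.startswith on body.toList.drop i (exact for 0 ≤ i)
def scanB (body : String) : List (Int × String) × PySem.Set String :=
  (PySem.List.pyRange 0 (PySem.Str.len body)).foldl (fun st i =>
    match firstHit st.2 (body.toList.drop i.toNat) SECTION_HEADINGS with
    | some h => (st.1 ++ [(i, h)], st.2.add h)
    | none => st) ([], PySem.Set.empty)

def extract_body_parts_alt (body : String) : List (String × String) :=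
  let found := (scanB body).1
  let bounds := found.tail.map (·.1) ++ [PySem.Str.len body]
  ((found.zip bounds).foldl (fun d pe =>
      d.insert (PySem.Str.replace pe.1.2 "# " "")
        (PySem.Str.strip (PySem.Str.slice body (some (pe.1.1 + PySem.Str.len pe.1.2)) (some pe.2))))
    PySem.Dict.empty).items

-- ===== PRECONDITION & SPEC =====
def Spec_extract_body_parts (body : String) (out : List (String × String)) : Prop := out = extract_body_parts_alt body
instance (body : String) (out : List (String × String)) : Decidable (Spec_extract_body_parts body out) := by unfold Spec_extract_body_parts; infer_instance

-- ===== CLAIM (what is proved, stated in full; the proofs are below) =====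
def Claim_equal_extract_body_parts : Prop := ∀ (body : String), Dom_extract_body_parts body → Spec_extract_body_parts body (extract_body_parts body)

-- ===== LEMMAS AND PROOFS =====

-- membership in A's positions list
theorem mem_posList (body : String) (p : Int) (h : String) :
    (p, h) ∈ posList body ↔ h ∈ SECTION_HEADINGS ∧ p = PySem.Str.find body h ∧ p ≠ -1 := by
  simp only [posList, SECTION_HEADINGS, List.foldl]
  split_ifs <;> simp_all <;> aesop

theorem posList_nodup (body : String) : (posList body).Nodup := by
  simp only [posList, SECTION_HEADINGS, List.foldl]
  split_ifs <;> simp_all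

-- no heading is a prefix of a different heading
theorem headings_prefix_free : ∀ h1 ∈ SECTION_HEADINGS, ∀ h2 ∈ SECTION_HEADINGS,
    h1.toList <+: h2.toList → h1 = h2 := by decide

theorem headings_ne_nil : ∀ h ∈ SECTION_HEADINGS, h.toList ≠ [] := by decide

-- at most one heading matches at a given position
theorem uniq_match (t : List Char) (h1 h2 : String) (m1 : h1 ∈ SECTION_HEADINGS)
    (m2 : h2 ∈ SECTION_HEADINGS) (p1 : h1.toList <+: t) (p2 : h2.toList <+: t) : h1 = h2 := by
  rcases List.prefix_or_prefix_of_prefix p1 p2 with hp | hp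
  · exact headings_prefix_free h1 m1 h2 m2 hp
  · exact (headings_prefix_free h2 m2 h1 m1 hp).symm

-- an element of posList: its fst is a genuine first-occurrence position
theorem posList_elem_spec (body : String) (p : Int) (h : String)
    (hm : (p, h) ∈ posList body) :
    h ∈ SECTION_HEADINGS ∧ 0 ≤ p ∧ h.toList <+: body.toList.drop p.toNat ∧
      (∀ j < p.toNat, ¬ h.toList <+: body.toList.drop j) := by
  rcases (mem_posList body p h).1 hm with ⟨hH, rfl, hne⟩
  have h0 : (0:Int) ≤ PySem.Str.find body h := by
    have := PySem.Chars.neg_one_le_find body.toList h.toList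
    rw [PySem.Str.find_eq]; rw [PySem.Str.find_eq] at hne; omega
  rw [PySem.Str.find_eq] at *
  have := PySem.Chars.find_spec (s := body.toList) (sub := h.toList) h0
  exact ⟨hH, h0, this.1, this.2⟩

theorem posList_fst_inj (body : String) (x y : Int × String)
    (hx : x ∈ posList body) (hy : y ∈ posList body) (hfst : x.1 = y.1) : x = y := by
  obtain ⟨p, h1⟩ := x; obtain ⟨q, h2⟩ := y
  simp only at hfst; subst hfst
  rcases posList_elem_spec body p h1 hx with ⟨m1, _, pf1, _⟩
  rcases posList_elem_spec body p h2 hy with ⟨m2, _, pf2, _⟩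
  rw [uniq_match _ h1 h2 m1 m2 pf1 pf2]

theorem firstHit_some (seen : PySem.Set String) (tail : List Char) (L : List String) (h : String)
    (hh : firstHit seen tail L = some h) :
    h ∈ L ∧ seen.contains h = false ∧ PySem.Chars.startswith tail h.toList = true := by
  induction L with
  | nil => simp [firstHit] at hh
  | cons a as ih =>
    rw [firstHit] at hh
    split_ifs at hh with hc
    · cases hh; exact ⟨List.mem_cons_self, hc⟩
    · rcases ih hh with ⟨h1, h2, h3⟩
      exact ⟨List.mem_cons_of_mem _ h1, h2, h3⟩

theorem firstHit_none (seen : PySem.Set String) (tail : List Char) (L : List String)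
    (hh : firstHit seen tail L = none) :
    ∀ h ∈ L, seen.contains h = false → PySem.Chars.startswith tail h.toList = false := by
  induction L with
  | nil => simp
  | cons a as ih =>
    rw [firstHit] at hh
    split_ifs at hh with hc
    · intro h hm hs
      rcases List.mem_cons.1 hm with rfl | hm'
      · by_contra hne; exact hc ⟨hs, by simpa using hne⟩
      · exact ih hh h hm' hs

theorem insertBy_congr {α : Type} (b1 b2 : α → α → Bool) (x : α) :
    ∀ acc : List α, (∀ y ∈ acc, b1 x y = b2 x y) →
    PySem.List.insertBy b1 x acc = PySem.List.insertBy b2 x acc := by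
  intro acc
  induction acc with
  | nil => intro _; rfl
  | cons y ys ih =>
    intro hyp
    rw [PySem.List.insertBy, PySem.List.insertBy, hyp y List.mem_cons_self]
    split_ifs with hb
    · rfl
    · rw [ih (fun z hz => hyp z (List.mem_cons_of_mem _ hz))]

theorem foldl_insertBy_congr {α : Type} (b1 b2 : α → α → Bool) :
    ∀ (l acc : List α), (∀ x ∈ l, ∀ y, (y ∈ acc ∨ y ∈ l) → b1 x y = b2 x y) →
    l.foldl (fun a x => PySem.List.insertBy b1 x a) acc =
    l.foldl (fun a x => PySem.List.insertBy b2 x a) acc := by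
  intro l
  induction l with
  | nil => intro _ _; rfl
  | cons x xs ih =>
    intro acc hyp
    simp only [List.foldl_cons]
    rw [insertBy_congr b1 b2 x acc (fun y hy => hyp x List.mem_cons_self y (Or.inl hy))]
    exact ih _ (fun x' hx' y hy => by
      rcases hy with hy | hy
      · rcases (PySem.List.mem_insertBy _ _ _ _).1 hy with rfl | hy'
        · exact hyp x' (List.mem_cons_of_mem _ hx') y (Or.inr List.mem_cons_self)
        · exact hyp x' (List.mem_cons_of_mem _ hx') y (Or.inl hy')
      · exact hyp x' (List.mem_cons_of_mem _ hx') y (Or.inr (List.mem_cons_of_mem _ hy)))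

theorem sorted2_eq_sorted (body : String) :
    PySem.List.sorted2 (posList body) (·.1) (·.2) = PySem.List.sorted (posList body) (·.1) := by
  simp only [PySem.List.sorted2, PySem.List.sorted, if_neg (by decide : ¬ (false = true))]
  apply foldl_insertBy_congr
  intro x hx y hy
  rcases hy with hy | hy
  · simp at hy
  · rcases lt_trichotomy x.1 y.1 with hlt | heq | hgt
    · simp [hlt, not_lt.2 (le_of_lt hlt)]
    · have : x = y := posList_fst_inj body x y hx hy heq
      subst this
      simp
    · simp [hgt, not_lt.2 (le_of_lt hgt)]

theorem filter_lt_succ (l : List (Int × String)) (k : Nat) :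
    (l.filter (fun p => decide (p.1 < ((k : Int) + 1)))).Perm
      ((l.filter (fun p => decide (p.1 < (k : Int)))) ++ (l.filter (fun p => decide (p.1 = (k : Int))))) := by
  induction l with
  | nil => simp
  | cons x xs ih =>
    simp only [List.filter_cons]
    by_cases h1 : x.1 < (k : Int)
    · rw [if_pos (by simp; omega), if_pos (by simpa using h1), if_neg (by simp; omega)]
      simpa using ih.cons x
    · by_cases h2 : x.1 = (k : Int)
      · rw [if_pos (by simp; omega), if_neg (by simpa using h1), if_pos (by simpa using h2)]
        exact (ih.cons x).trans List.perm_middle.symm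
      · rw [if_neg (by simp; omega), if_neg (by simpa using h1), if_neg (by simpa using h2)]
        exact ih

theorem filter_singleton {α : Type} (p : α → Bool) (x : α) :
    ∀ l : List α, x ∈ l → p x = true → (∀ y ∈ l, p y = true → y = x) → l.Nodup →
    l.filter p = [x] := by
  intro l
  induction l with
  | nil => simp
  | cons a as ih =>
    intro hx hp huniq hnd
    by_cases hax : a = x
    · subst hax
      simp only [List.filter_cons, hp, if_true]
      have : as.filter p = [] := by
        rw [List.filter_eq_nil_iff]
        intro y hy hpy
        have := huniq y (List.mem_cons_of_mem _ hy) hpy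
        subst this
        exact ((List.nodup_cons.1 hnd).1 hy).elim
      rw [this]
    · have hpa : ¬ p a = true := fun hpa => hax (huniq a List.mem_cons_self hpa)
      simp only [List.filter_cons, if_neg hpa]
      exact ih (by rcases List.mem_cons.1 hx with rfl | h; exact (hax rfl).elim; exact h)
        hp (fun y hy => huniq y (List.mem_cons_of_mem _ hy)) (List.nodup_cons.1 hnd).2

-- the step of B's scan, named for the proofs (definitionally the lambda inside scanB)
def stepB (body : String) (st : List (Int × String) × PySem.Set String) (i : Int) :
    List (Int × String) × PySem.Set String :=
  match firstHit st.2 (body.toList.drop i.toNat) SECTION_HEADINGS with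
  | some h => (st.1 ++ [(i, h)], st.2.add h)
  | none => st

theorem scan_inv (body : String) : ∀ (k : Nat), k ≤ body.toList.length →
    (((PySem.List.pyRange 0 (k:Int)).foldl (stepB body) ([], PySem.Set.empty)).1.Perm
      ((posList body).filter (fun p => decide (p.1 < (k : Int)))) ∧
     ((PySem.List.pyRange 0 (k:Int)).foldl (stepB body) ([], PySem.Set.empty)).1.Pairwise (fun a b => a.1 < b.1) ∧
     ((PySem.List.pyRange 0 (k:Int)).foldl (stepB body) ([], PySem.Set.empty)).2 =
       ((PySem.List.pyRange 0 (k:Int)).foldl (stepB body) ([], PySem.Set.empty)).1.map (·.2)) := by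
  intro k
  induction k with
  | zero =>
    intro _
    rw [PySem.List.pyRange_one_eq_nil (by omega)]
    refine ⟨?_, by simp, by simp⟩
    have : ((posList body).filter (fun p => decide (p.1 < ((0:Nat) : Int)))) = [] := by
      rw [List.filter_eq_nil_iff]
      intro p hp
      obtain ⟨x, y⟩ := p
      rcases posList_elem_spec body x y hp with ⟨_, h0, _, _⟩
      simp only [decide_eq_true_eq]
      omega
    rw [this]
    simp
  | succ k ih =>
    intro hk1
    obtain ⟨hperm, hpw, hseen⟩ := ih (Nat.le_of_succ_le hk1)
    rw [show (((k+1:Nat)):Int) = (k:Int)+1 by push_cast; ring] at *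
    rw [PySem.List.pyRange_one_succ_right (by omega), List.foldl_append]
    set st := (PySem.List.pyRange 0 (k:Int)).foldl (stepB body) ([], PySem.Set.empty) with hst
    simp only [List.foldl_cons, List.foldl_nil]
    have htn : ((k:Int)).toNat = k := by omega
    -- members of st.1 are exactly the posList entries with position < k
    have hmemst : ∀ x, x ∈ st.1 ↔ (x ∈ posList body ∧ x.1 < (k:Int)) := by
      intro x
      rw [hperm.mem_iff, List.mem_filter]
      simp
    cases hfh : firstHit st.2 (body.toList.drop ((k:Int)).toNat) SECTION_HEADINGS with
    | some h =>
      have hstep : stepB body st (k:Int) = (st.1 ++ [((k:Int), h)], st.2.add h) := by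
        rw [stepB, hfh]
      rw [hstep]
      rcases firstHit_some _ _ _ _ hfh with ⟨hH, hcont, hsw⟩
      rw [htn] at hsw
      have hpre : h.toList <+: body.toList.drop k := (PySem.Chars.startswith_iff _ _).1 hsw
      have hnotmem : h ∉ st.2 := by
        intro hmem
        have : PySem.Set.contains st.2 h = true := by
          simp [PySem.Set.contains]; exact hmem
        rw [hcont] at this; cases this
      -- the find position of h is exactly k
      have hne : PySem.Chars.find body.toList h.toList ≠ -1 := by
        rw [PySem.Chars.find_ne_neg_one_iff]
        exact hpre.isInfix.trans (List.drop_suffix k body.toList).isInfix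
      have h0 : 0 ≤ PySem.Chars.find body.toList h.toList := by
        have := PySem.Chars.neg_one_le_find body.toList h.toList; omega
      obtain ⟨hfpre, hfmin⟩ := PySem.Chars.find_spec (s := body.toList) (sub := h.toList) h0
      have hle : (PySem.Chars.find body.toList h.toList).toNat ≤ k := by
        by_contra hgt
        exact hfmin k (by omega) hpre
      have hfk : PySem.Chars.find body.toList h.toList = (k:Int) := by
        by_contra hneq
        have hlt : (PySem.Chars.find body.toList h.toList).toNat < k := by omega
        have hmemP : (PySem.Chars.find body.toList h.toList, h) ∈ posList body := by
          rw [mem_posList]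
          exact ⟨hH, by rw [PySem.Str.find_eq], hne⟩
        have : (PySem.Chars.find body.toList h.toList, h) ∈ st.1 := by
          rw [hmemst]; exact ⟨hmemP, by omega⟩
        have : h ∈ st.1.map (·.2) := List.mem_map.2 ⟨_, this, rfl⟩
        rw [← hseen] at this
        exact hnotmem this
      have hmemP : ((k:Int), h) ∈ posList body := by
        rw [mem_posList]
        exact ⟨hH, by rw [PySem.Str.find_eq, hfk], by omega⟩
      -- posList entries at position k: exactly (k, h)
      have hfilk : (posList body).filter (fun p => decide (p.1 = (k:Int))) = [((k:Int), h)] := by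
        apply filter_singleton _ _ _ hmemP (by simp)
          (fun y hy hpy => posList_fst_inj body y ((k:Int), h) hy hmemP (by simpa using hpy))
          (posList_nodup body)
      refine ⟨?_, ?_, ?_⟩
      · exact (hperm.append (List.Perm.refl [((k:Int), h)])).trans
          ((filter_lt_succ (posList body) k).trans (by rw [hfilk])).symm
      · rw [List.pairwise_append]
        refine ⟨hpw, by simp, ?_⟩
        intro a ha b hb
        rw [List.mem_singleton] at hb
        subst hb
        exact ((hmemst a).1 ha).2
      · have hadd : st.2.add h = st.2 ++ [h] := by
          simp [PySem.Set.add]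
          exact hnotmem
        rw [hadd, hseen]
        simp
    | none =>
      have hfilk : (posList body).filter (fun p => decide (p.1 = (k:Int))) = [] := by
        rw [List.filter_eq_nil_iff]
        rintro ⟨q, g⟩ hq hdec
        simp only [decide_eq_true_eq] at hdec
        subst hdec
        rcases posList_elem_spec body (k:Int) g hq with ⟨hH, _, hpre, _⟩
        rw [htn] at hpre
        cases hcg : PySem.Set.contains st.2 g with
        | false =>
          have := firstHit_none _ _ _ hfh g hH hcg
          rw [htn, (PySem.Chars.startswith_iff _ _).2 hpre] at this
          cases this
        | true =>
          have hg2 : g ∈ st.2 := by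
            have hcg' := hcg; simp [PySem.Set.contains] at hcg'; exact hcg'
          rw [hseen] at hg2
          rcases List.mem_map.1 hg2 with ⟨x, hx, hx2⟩
          have hxm := (hmemst x).1 hx
          rcases (mem_posList body x.1 x.2).1 (by simpa using hxm.1) with ⟨_, hxf, _⟩
          rcases (mem_posList body (k:Int) g).1 hq with ⟨_, hkf, _⟩
          rw [hx2] at hxf
          have hxlt := hxm.2
          omega
      have hstep : stepB body st (k:Int) = st := by
        rw [stepB, hfh]
      rw [hstep]
      refine ⟨?_, hpw, hseen⟩
      exact hperm.trans ((filter_lt_succ (posList body) k).trans (by rw [hfilk]; simp)).symm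

theorem found_eq (body : String) :
    (scanB body).1 = PySem.List.sorted (posList body) (·.1) := by
  have hsc : scanB body = (PySem.List.pyRange 0 ((body.toList.length : Nat) : Int)).foldl
      (stepB body) ([], PySem.Set.empty) := by
    rw [scanB, PySem.Str.len_eq]; rfl
  rw [hsc]
  obtain ⟨hperm, hpw, _⟩ := scan_inv body body.toList.length le_rfl
  have hfull : (posList body).filter (fun p => decide (p.1 < (body.toList.length : Int))) = posList body := by
    rw [List.filter_eq_self]
    rintro ⟨x, y⟩ hp
    rcases posList_elem_spec body x y hp with ⟨hH, h0, hpre, _⟩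
    have hne := headings_ne_nil y hH
    have hlt : x.toNat < body.toList.length := by
      by_contra hge
      have hnil : body.toList.drop x.toNat = [] := List.drop_eq_nil_iff.2 (by omega)
      rw [hnil] at hpre
      exact hne (List.prefix_nil.1 hpre)
    simp only [decide_eq_true_eq]
    omega
  rw [hfull] at hperm
  exact (PySem.List.sorted_eq_of_perm_of_pairwise_lt _ _ _ hperm hpw).symm

theorem parts_eq (body : String) (ps : List (Int × String)) (d : PySem.Dict String String) :
    partsLoopA body ps d = ((ps.zip (ps.tail.map (·.1) ++ [PySem.Str.len body])).foldl (fun d pe =>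
      d.insert (PySem.Str.replace pe.1.2 "# " "")
        (PySem.Str.strip (PySem.Str.slice body (some (pe.1.1 + PySem.Str.len pe.1.2)) (some pe.2)))) d) := by
  induction ps generalizing d with
  | nil => rfl
  | cons x rest ih =>
    obtain ⟨p, h⟩ := x
    cases rest with
    | nil => simp [partsLoopA]
    | cons y rest' =>
      obtain ⟨q, g⟩ := y
      simp only [partsLoopA, List.tail_cons, List.map_cons, List.cons_append, List.zip_cons_cons,
        List.foldl_cons]
      exact ih _

-- ===== VERDICT (by name: the statement is the Claim_ definition above) =====
theorem extract_body_parts_spec : Claim_equal_extract_body_parts := by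
  intro body _
  unfold Spec_extract_body_parts extract_body_parts extract_body_parts_alt
  rw [sorted2_eq_sorted, ← found_eq, parts_eq]
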